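-- pv_equiv track=rewrite | github.com/DeanKuhn/WGU-DSAII-Project | genetic_algorithm.py | ordered_crossover
-- ===== SOURCE A (Python) =====
-- def ordered_crossover(parent1, parent2):
--     size = len(parent1)
--     child = [None] * size
--
--     # lock sentinel positions for parent 1
--     for i, gene in enumerate(parent1):
--         if gene < 0:
--             child[i] = gene
--
--     # find package orders for parent 2
--     p2_packages = [gene for gene in parent2 if not (gene < 0)]
--
--     # fill in the gaps
--     p2_index = 0
--     for i in range(size):
--         if child[i] is None:
--             child[i] = p2_packages[p2_index]
--             p2_index += 1
--
--     return child
-- ===== SOURCE B (Python) =====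
-- def ordered_crossover(parent1, parent2):
--     # Two-pointer merge: no filtered copy of parent2 and no [None]*size scaffold.
--     # A cursor j walks the RAW parent2, skipping sentinels lazily on demand;
--     # parent2[j] raises IndexError exactly where A's p2_packages[p2_index] does.
--     child = []
--     j = 0
--     for gene in parent1:
--         if gene < 0:
--             child.append(gene)
--         else:
--             while parent2[j] < 0:
--                 j += 1
--             child.append(parent2[j])
--             j += 1
--     return child
-- ===== Notes on version B (the rewrite author's own statement) =====
-- stated objective: alternative
-- what changed: Replaces A's three-stage scheme (pre-fill a [None]*size scaffold, lock sentinels by index, build a filtered p2_packages list, then a separate gap-filling pass) by a two-pointer merge that never materialises the filtered list or the scaffold: a cursor walks the raw parent2, skipping sentinels lazily, and the child is emitted directly in one pass over parent1.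
import Mathlib
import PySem

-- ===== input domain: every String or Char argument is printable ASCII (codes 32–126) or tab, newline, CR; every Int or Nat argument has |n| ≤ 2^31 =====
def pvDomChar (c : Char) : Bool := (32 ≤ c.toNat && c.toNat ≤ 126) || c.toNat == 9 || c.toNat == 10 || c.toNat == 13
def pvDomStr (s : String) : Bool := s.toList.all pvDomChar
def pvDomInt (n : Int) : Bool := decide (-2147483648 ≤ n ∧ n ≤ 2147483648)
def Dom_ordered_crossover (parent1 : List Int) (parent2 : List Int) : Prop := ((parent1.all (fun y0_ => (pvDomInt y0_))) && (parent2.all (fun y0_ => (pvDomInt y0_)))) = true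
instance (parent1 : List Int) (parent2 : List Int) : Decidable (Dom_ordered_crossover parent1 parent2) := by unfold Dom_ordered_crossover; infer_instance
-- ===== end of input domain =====

-- B replaces A's three-stage scheme (None scaffold, sentinel-lock loop, filtered p2_packages list,
-- gap-fill loop) by a two-pointer merge over the raw parent2 (objective: alternative decomposition).

-- ===== PORT A =====
def ordered_crossover (parent1 : List Int) (parent2 : List Int) : List Int :=
  let size : Int := (parent1.length : Int)
  let child : List (Option Int) := List.replicate parent1.length none
  -- lock sentinel positions for parent 1 (enumerate indices are always in range, so pySetD is exact)
  let child := (PySem.List.enumerate parent1 0).foldl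
    (fun c p => if p.2 < 0 then PySem.List.pySetD c p.1 (some p.2) else c) child
  -- find package orders for parent 2
  let p2_packages := parent2.filter (fun gene => !(decide (gene < 0)))
  -- fill in the gaps: 'child[i] is None' is 'pyGet? … = some none' (i ∈ range(size) is always in range);
  -- 'p2_packages[p2_index]' raises IndexError when exhausted — those inputs are excluded by Pre_
  let st := (PySem.List.pyRange 0 size 1).foldl
    (fun (st : List (Option Int) × Int) i =>
      if PySem.List.pyGet? st.1 i = some none then
        (PySem.List.pySetD st.1 i (some ((PySem.List.pyGet? p2_packages st.2).getD 0)), st.2 + 1)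
      else st) (child, 0)
  st.1.map (fun o => o.getD 0)  -- every entry is filled after the loop

-- ===== PORT B =====
-- the 'while parent2[j] < 0: j += 1' loop of Source B; 'parent2[j]' raising IndexError
-- (= pyGet? none) stops the loop — reached only outside Pre_
def pvSkip (p2 : List Int) (j : Int) : Int :=
  match h : PySem.List.pyGet? p2 j with
  | some v => if v < 0 then pvSkip p2 (j + 1) else j
  | none => j
termination_by ((p2.length : Int) - j).toNat
decreasing_by
  have h' : PySem.List.pyGet? p2 j ≠ none := by simp [h]
  rw [Ne, PySem.List.pyGet?_eq_none_iff, not_not, PySem.Raise.InRange] at h'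
  omega

def ordered_crossover_alt (parent1 : List Int) (parent2 : List Int) : List Int :=
  let st := parent1.foldl
    (fun (st : List Int × Int) gene =>
      if gene < 0 then (st.1 ++ [gene], st.2)
      else
        let j := pvSkip parent2 st.2
        (st.1 ++ [(PySem.List.pyGet? parent2 j).getD 0], j + 1))
    ([], 0)
  st.1

-- ===== PRECONDITION & SPEC =====
-- Pre_ excludes exactly the inputs where parent1 has more non-sentinel genes than parent2:
-- there BOTH Pythons raise IndexError (A returns no value).
def Pre_ordered_crossover (parent1 : List Int) (parent2 : List Int) : Prop :=
  parent1.countP (fun g => decide (0 ≤ g)) ≤ parent2.countP (fun g => decide (0 ≤ g))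
instance (parent1 : List Int) (parent2 : List Int) : Decidable (Pre_ordered_crossover parent1 parent2) := by
  unfold Pre_ordered_crossover; infer_instance
def pvWitness_ordered_crossover : List Int × List Int := ([1, -1, 2], [5, 6])

def Spec_ordered_crossover (parent1 : List Int) (parent2 : List Int) (out : List Int) : Prop := out = ordered_crossover_alt parent1 parent2
instance (parent1 : List Int) (parent2 : List Int) (out : List Int) : Decidable (Spec_ordered_crossover parent1 parent2 out) := by unfold Spec_ordered_crossover; infer_instance

-- ===== CLAIM (what is proved, stated in full; the proofs are below) =====
def Claim_equal_ordered_crossover : Prop := ∀ (parent1 : List Int) (parent2 : List Int), Dom_ordered_crossover parent1 parent2 → Pre_ordered_crossover parent1 parent2 → Spec_ordered_crossover parent1 parent2 (ordered_crossover parent1 parent2)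

-- ===== LEMMAS AND PROOFS =====

-- the value A computes: sentinels kept, gaps taken from the filtered list p2f at a running index
def pvMix (p2 : List Int) : List Int → Int → List Int
  | [], _ => []
  | g :: gs, idx =>
      if g < 0 then g :: pvMix p2 gs idx
      else (PySem.List.pyGet? p2 idx).getD 0 :: pvMix p2 gs (idx + 1)

-- the value B computes: sentinels kept, gaps taken by dropping sentinels off a suffix of raw p2
def pvMix2 : List Int → List Int → List Int
  | _, [] => []
  | rest, g :: gs =>
      if g < 0 then g :: pvMix2 rest gs
      else
        (rest.dropWhile (fun x => decide (x < 0))).headD 0 ::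
          pvMix2 (rest.dropWhile (fun x => decide (x < 0))).tail gs

-- the common normal form: consume the head of a queue at each non-sentinel gene
def pvMix3 : List Int → List Int → List Int
  | _, [] => []
  | q, g :: gs => if g < 0 then g :: pvMix3 q gs else q.headD 0 :: pvMix3 q.tail gs

-- ---- A side (scaffold + two loops ⇒ pvMix) ----

theorem pvSet_mid {α : Type} (pre t : List α) (x v : α) :
    List.set (pre ++ x :: t) pre.length v = pre ++ v :: t := by
  induction pre with
  | nil => simp
  | cons a l ih => simp [ih]

def pvMask (g : Int) : Option Int := if g < 0 then some g else none

theorem pvLock_loop (xs : List Int) : ∀ (pre : List (Option Int)),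
    ((PySem.List.enumerate xs (pre.length : Int)).foldl
      (fun c p => if p.2 < 0 then PySem.List.pySetD c p.1 (some p.2) else c)
      (pre ++ List.replicate xs.length none)) = pre ++ xs.map pvMask := by
  induction xs with
  | nil => simp [PySem.List.enumerate_nil]
  | cons g gs ih =>
    intro pre
    rw [PySem.List.enumerate_cons]
    simp only [List.foldl_cons, List.length_cons, List.replicate_succ]
    by_cases h : g < 0
    · have h1 : PySem.List.pySetD (pre ++ none :: List.replicate gs.length none)
          (pre.length : Int) (some g) = pre ++ some g :: List.replicate gs.length none := by
        rw [PySem.List.pySetD_natCast, pvSet_mid]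
      simp only [h, if_pos, h1]
      have := ih (pre ++ [some g])
      simp only [List.length_append, List.length_cons, List.length_nil] at this
      have hc : ((pre.length : Int) + 1) = ((pre.length + 1 : Nat) : Int) := by push_cast; ring
      rw [hc]
      simpa [pvMask, h, List.append_assoc] using this
    · simp only [h, if_neg, not_false_iff]
      have := ih (pre ++ [none])
      simp only [List.length_append, List.length_cons, List.length_nil] at this
      have hc : ((pre.length : Int) + 1) = ((pre.length + 1 : Nat) : Int) := by push_cast; ring
      rw [hc]
      simpa [pvMask, h, List.append_assoc] using this

theorem pvFill_loop (p2 : List Int) (xs : List Int) : ∀ (pre : List (Option Int)) (idx : Int),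
    ((PySem.List.pyRange (pre.length : Int) ((pre.length : Int) + (xs.length : Int)) 1).foldl
      (fun (st : List (Option Int) × Int) i =>
        if PySem.List.pyGet? st.1 i = some none then
          (PySem.List.pySetD st.1 i (some ((PySem.List.pyGet? p2 st.2).getD 0)), st.2 + 1)
        else st) (pre ++ xs.map pvMask, idx)).1
    = pre ++ (pvMix p2 xs idx).map some := by
  induction xs with
  | nil =>
    intro pre idx
    rw [PySem.List.pyRange_one_eq_nil (by simp)]
    simp [pvMix]
  | cons g gs ih =>
    intro pre idx
    rw [PySem.List.pyRange_one_cons (by simp only [List.length_cons]; push_cast; omega)]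
    have hget : PySem.List.pyGet? (pre ++ pvMask g :: gs.map pvMask) (pre.length : Int)
        = some (pvMask g) := by simp
    simp only [List.map_cons, List.foldl_cons, List.length_cons, hget]
    by_cases h : g < 0
    · have hm : pvMask g = some g := by simp [pvMask, h]
      rw [hm, if_neg (by simp)]
      have := ih (pre ++ [some g]) idx
      simp only [List.length_append, List.length_cons, List.length_nil] at this
      rw [show ((pre.length:Int) + ↑(gs.length + 1)) = ((pre.length + 1 : Nat) : Int) + ↑gs.length by push_cast; ring]
      push_cast at this ⊢
      simpa [pvMix, h, List.append_assoc] using this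
    · have hm : pvMask g = none := by simp [pvMask, h]
      rw [hm, if_pos rfl]
      have hset : PySem.List.pySetD (pre ++ none :: gs.map pvMask) (pre.length : Int)
          (some ((PySem.List.pyGet? p2 idx).getD 0))
          = pre ++ some ((PySem.List.pyGet? p2 idx).getD 0) :: gs.map pvMask := by
        simp
      rw [hset]
      have := ih (pre ++ [some ((PySem.List.pyGet? p2 idx).getD 0)]) (idx + 1)
      simp only [List.length_append, List.length_cons, List.length_nil] at this
      rw [show ((pre.length:Int) + ↑(gs.length + 1)) = ((pre.length + 1 : Nat) : Int) + ↑gs.length by push_cast; ring]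
      push_cast at this ⊢
      simpa [pvMix, h, List.append_assoc] using this

-- ---- normal-form bridges ----

-- filtering commutes with dropping the leading sentinels
theorem pvFilter_dw (rest : List Int) :
    rest.filter (fun g => !(decide (g < 0))) =
      (rest.dropWhile (fun x => decide (x < 0))).filter (fun g => !(decide (g < 0))) := by
  induction rest with
  | nil => simp
  | cons a t ih =>
    by_cases h : a < 0
    · simp [List.dropWhile, List.filter, h, ih]
    · simp [List.dropWhile, List.filter, h]

-- the head surviving dropWhile (< 0) is non-negative
theorem pvDW_head_nonneg : ∀ (rest : List Int) (a : Int) (t : List Int),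
    rest.dropWhile (fun x => decide (x < 0)) = a :: t → ¬ a < 0 := by
  intro rest
  induction rest with
  | nil => intro a t h; cases h
  | cons x xs ih =>
    intro a t h
    by_cases hx : x < 0
    · rw [List.dropWhile_cons_of_pos (by simpa using hx)] at h
      exact ih a t h
    · rw [List.dropWhile_cons_of_neg (by simpa using hx)] at h
      cases h; exact hx

-- B's queue view equals the common normal form on the filtered list
theorem pvMix2_eq_mix3 (xs : List Int) : ∀ rest : List Int,
    pvMix2 rest xs = pvMix3 (rest.filter (fun g => !(decide (g < 0)))) xs := by
  induction xs with
  | nil => intro rest; simp [pvMix2, pvMix3]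
  | cons g gs ih =>
    intro rest
    by_cases h : g < 0
    · simp [pvMix2, pvMix3, h, ih]
    · rcases hr : rest.dropWhile (fun x => decide (x < 0)) with _ | ⟨a, t⟩
      · have hf : rest.filter (fun g => !(decide (g < 0))) = [] := by
          rw [pvFilter_dw, hr]; rfl
        simp [pvMix2, pvMix3, h, hr, hf, ih]
      · have ha : ¬ a < 0 := pvDW_head_nonneg rest a t hr
        have hf : rest.filter (fun g => !(decide (g < 0)))
            = a :: t.filter (fun g => !(decide (g < 0))) := by
          rw [pvFilter_dw, hr, List.filter_cons]; simp [ha]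
        simp [pvMix2, pvMix3, h, hr, hf, ih]

-- A's running-index view equals the common normal form on the dropped suffix
theorem pvMix_eq_mix3 (xs : List Int) : ∀ (q : List Int) (idx : Int), 0 ≤ idx →
    pvMix q xs idx = pvMix3 (q.drop idx.toNat) xs := by
  induction xs with
  | nil => intro q idx _; simp [pvMix, pvMix3]
  | cons g gs ih =>
    intro q idx hidx
    by_cases h : g < 0
    · simp [pvMix, pvMix3, h, ih q idx hidx]
    · have hget : (PySem.List.pyGet? q idx).getD 0 = (q.drop idx.toNat).headD 0 := by
        rw [PySem.List.pyGet?_of_nonneg q hidx]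
        simp [List.headD_eq_head?_getD, List.head?_drop]
      have htail : q.drop (idx + 1).toNat = (q.drop idx.toNat).tail := by
        rw [List.tail_drop, show (idx + 1).toNat = idx.toNat + 1 by omega]
      simp [pvMix, pvMix3, h, ih q (idx + 1) (by omega), hget, htail]

-- ---- B side (pvSkip + fold ⇒ pvMix2) ----

theorem pvSkip_spec (p2 : List Int) : ∀ (j : Int), 0 ≤ j →
    (PySem.List.pyGet? p2 (pvSkip p2 j)).getD 0
        = ((p2.drop j.toNat).dropWhile (fun x => decide (x < 0))).headD 0 ∧
    p2.drop (pvSkip p2 j + 1).toNat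
        = ((p2.drop j.toNat).dropWhile (fun x => decide (x < 0))).tail ∧
    0 ≤ pvSkip p2 j := by
  intro j
  induction j using pvSkip.induct p2 with
  | case1 j v h hv ih =>
    intro hj
    have hget : PySem.List.pyGet? p2 j = p2[j.toNat]? := PySem.List.pyGet?_of_nonneg p2 hj
    have hsome : p2[j.toNat]? = some v := by rw [← hget, h]
    have hlt : j.toNat < p2.length := by
      by_contra hc
      rw [List.getElem?_eq_none (by omega)] at hsome; simp at hsome
    have hdrop : p2.drop j.toNat = v :: p2.drop (j.toNat + 1) := by
      rw [List.drop_eq_getElem_cons hlt]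
      congr 1
      exact (List.getElem?_eq_some_iff.mp hsome).2
    have hskip : pvSkip p2 j = pvSkip p2 (j + 1) := by
      conv_lhs => rw [pvSkip, h]
      simp [hv]
    have h1 : (j + 1).toNat = j.toNat + 1 := by omega
    have := ih (by omega)
    rw [hskip, hdrop]
    rw [h1] at this
    simpa [List.dropWhile, hv] using this
  | case2 j v h hv =>
    intro hj
    have hget : PySem.List.pyGet? p2 j = p2[j.toNat]? := PySem.List.pyGet?_of_nonneg p2 hj
    have hsome : p2[j.toNat]? = some v := by rw [← hget, h]
    have hlt : j.toNat < p2.length := by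
      by_contra hc
      rw [List.getElem?_eq_none (by omega)] at hsome; simp at hsome
    have hdrop : p2.drop j.toNat = v :: p2.drop (j.toNat + 1) := by
      rw [List.drop_eq_getElem_cons hlt]
      congr 1
      exact (List.getElem?_eq_some_iff.mp hsome).2
    have hskip : pvSkip p2 j = j := by
      conv_lhs => rw [pvSkip, h]
      simp [hv]
    rw [hskip, hdrop]
    refine ⟨by simp [h, List.dropWhile, hv], ?_, hj⟩
    rw [show (j + 1).toNat = j.toNat + 1 by omega]
    simp [List.dropWhile, hv]
  | case3 j h =>
    intro hj
    have hnone : p2[j.toNat]? = none := by rw [← PySem.List.pyGet?_of_nonneg p2 hj, h]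
    have hge : p2.length ≤ j.toNat := by
      by_contra hc
      rw [List.getElem?_eq_getElem (by omega)] at hnone; simp at hnone
    have hskip : pvSkip p2 j = j := by
      conv_lhs => rw [pvSkip, h]
    have hd1 : p2.drop j.toNat = [] := List.drop_eq_nil_of_le hge
    have hd2 : p2.drop (j + 1).toNat = [] := List.drop_eq_nil_of_le (by omega)
    rw [hskip, hd1, hd2]
    exact ⟨by simp [h], rfl, hj⟩

theorem pvB_loop (p2 : List Int) (xs : List Int) : ∀ (acc : List Int) (j : Int), 0 ≤ j →
    (xs.foldl
      (fun (st : List Int × Int) gene =>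
        if gene < 0 then (st.1 ++ [gene], st.2)
        else
          let j' := pvSkip p2 st.2
          (st.1 ++ [(PySem.List.pyGet? p2 j').getD 0], j' + 1))
      (acc, j)).1 = acc ++ pvMix2 (p2.drop j.toNat) xs := by
  induction xs with
  | nil => intro acc j _; simp [pvMix2]
  | cons g gs ih =>
    intro acc j hj
    by_cases h : g < 0
    · simp only [List.foldl_cons, h, if_pos]
      rw [ih (acc ++ [g]) j hj]
      simp [pvMix2, h]
    · obtain ⟨he, ht, hj'⟩ := pvSkip_spec p2 j hj
      simp only [List.foldl_cons, h, if_neg, not_false_iff]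
      rw [ih _ (pvSkip p2 j + 1) (by omega)]
      rw [ht, he]
      simp [pvMix2, h]

-- ===== VERDICT (by name: the statement is the Claim_ definition above) =====
theorem ordered_crossover_spec : Claim_equal_ordered_crossover := by
  intro parent1 parent2 _ _
  unfold Spec_ordered_crossover ordered_crossover ordered_crossover_alt
  have hlock := pvLock_loop parent1 ([] : List (Option Int))
  have hfill := pvFill_loop (parent2.filter (fun gene => !(decide (gene < 0)))) parent1
      ([] : List (Option Int)) 0
  have hb := pvB_loop parent2 parent1 [] 0 le_rfl
  have hA := pvMix_eq_mix3 parent1 (parent2.filter (fun gene => !(decide (gene < 0)))) 0 le_rfl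
  have hB := pvMix2_eq_mix3 parent1 parent2
  simp only [List.length_nil, Nat.cast_zero, List.nil_append, zero_add] at hlock hfill hb
  simp only [hlock, hfill, hb, List.map_map]
  simp only [Int.toNat_zero, List.drop_zero] at *
  rw [hB, hA]
  simp
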